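-- pv_equiv track=rewrite | github.com/MasterDD-L34D/Game | tools/py/validate_export.py | _find_mentions
-- ===== SOURCE A (Python) =====
-- from typing import Any, Dict, Iterable, List, Mapping, Sequence, Set
--
-- def _find_mentions(tokens: Iterable[str], keywords: Set[str]) -> Set[str]:
--     found: Set[str] = set()
--     if not keywords:
--         return found
--     for token in tokens:
--         for keyword in keywords:
--             if keyword and keyword in token:
--                 found.add(keyword)
--     return found
-- ===== SOURCE B (Python) =====
-- def _find_mentions(tokens, keywords):
--     found = set()
--     pending = [k for k in keywords if k]  # keywords not found yet
--     for token in tokens: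
--         if not pending:
--             break
--         still = []
--         for k in pending:
--             if k in token:
--                 found.add(k)
--             else:
--                 still.append(k)
--         pending = still
--     return found
-- ===== Notes on version B (the rewrite author's own statement) =====
-- stated objective: alternative
-- what changed: Replaces the full tokens x keywords rescan with a shrinking worklist: each keyword is tested only until its first match, found keywords are removed from the inner loop, and the token scan stops early once every keyword has been found.
import Mathlib
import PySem

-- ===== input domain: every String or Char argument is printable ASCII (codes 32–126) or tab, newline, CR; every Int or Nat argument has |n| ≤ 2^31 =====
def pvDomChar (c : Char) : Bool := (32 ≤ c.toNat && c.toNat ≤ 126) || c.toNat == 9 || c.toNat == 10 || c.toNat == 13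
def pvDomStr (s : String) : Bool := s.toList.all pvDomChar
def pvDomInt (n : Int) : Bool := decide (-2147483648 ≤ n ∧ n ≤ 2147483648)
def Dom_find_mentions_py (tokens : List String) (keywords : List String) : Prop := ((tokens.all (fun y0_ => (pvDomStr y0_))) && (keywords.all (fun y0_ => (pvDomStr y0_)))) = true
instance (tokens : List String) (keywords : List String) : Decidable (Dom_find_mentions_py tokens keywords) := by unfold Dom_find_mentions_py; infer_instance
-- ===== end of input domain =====

-- B replaces A's full tokens×keywords rescan by a shrinking worklist of not-yet-found
-- keywords (each keyword tested only until its first match, early exit when all found);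
-- same return value, objective: alternative (not measured faster).

-- ===== PORT A =====
-- inner 'for keyword in keywords' loop of A (iterated in the list order of the distinct elements)
def fmAInner (found : List String) (token : String) (keywords : List String) : List String :=
  keywords.foldl
    (fun found keyword =>
      if keyword != "" && PySem.Str.isIn keyword token then PySem.Set.add found keyword
      else found)
    found

def find_mentions_py (tokens : List String) (keywords : List String) : List String :=
  let found : List String := PySem.Set.empty
  if keywords.isEmpty then found
  else tokens.foldl (fun found token => fmAInner found token keywords) found

-- ===== PORT B =====
-- one token of B: test each pending keyword against the token; matches go into found,
-- the rest stay pending ('still' list in Source B)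
def fmAltStep (st : List String × List String) (token : String) : List String × List String :=
  st.2.foldl
    (fun (st : List String × List String) k =>
      if PySem.Str.isIn k token then (PySem.Set.add st.1 k, st.2)
      else (st.1, st.2 ++ [k]))
    (st.1, [])

-- B's token loop with early exit when nothing is pending
def fmAltLoop : List String → List String → List String → List String
  | found, _, [] => found
  | found, pending, token :: rest =>
      if pending.isEmpty then found
      else
        let st := fmAltStep (found, pending) token
        fmAltLoop st.1 st.2 rest

def find_mentions_py_alt (tokens : List String) (keywords : List String) : List String :=
  fmAltLoop PySem.Set.empty (keywords.filter (fun k => k != "")) tokens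

-- ===== PRECONDITION & SPEC =====
def Spec_find_mentions_py (tokens : List String) (keywords : List String) (out : List String) : Prop := out = find_mentions_py_alt tokens keywords
instance (tokens : List String) (keywords : List String) (out : List String) : Decidable (Spec_find_mentions_py tokens keywords out) := by unfold Spec_find_mentions_py; infer_instance

-- ===== CLAIM (what is proved, stated in full; the proofs are below) =====
def Claim_equal_find_mentions_py : Prop := ∀ (tokens : List String) (keywords : List String), Dom_find_mentions_py tokens keywords → Spec_find_mentions_py tokens keywords (find_mentions_py tokens keywords)

-- ===== LEMMAS AND PROOFS =====

-- the pending list B maintains, characterised from A's state: nonempty keywords not yet found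
def fmFilterP (s : List String) (ks : List String) : List String :=
  ks.filter (fun k => k != "" && !(PySem.Set.contains s k))

theorem fmAInner_cons (found : List String) (token k : String) (ks : List String) :
    fmAInner found token (k :: ks)
      = fmAInner (if k != "" && PySem.Str.isIn k token then PySem.Set.add found k else found)
          token ks := rfl

theorem mem_fmAInner (keywords : List String) (found : List String) (token : String) (x : String) :
    x ∈ fmAInner found token keywords ↔
      x ∈ found ∨ (x ∈ keywords ∧ x ≠ "" ∧ PySem.Str.isIn x token = true) := by
  induction keywords generalizing found with
  | nil => simp [fmAInner]
  | cons k ks ih =>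
    rw [fmAInner_cons, ih]
    by_cases h1 : k = ""
    · subst h1
      simp only [bne_self_eq_false, Bool.false_and, if_neg (by simp : ¬(false = true))]
      constructor
      · rintro (h | ⟨hm, hx⟩)
        · exact Or.inl h
        · exact Or.inr ⟨List.mem_cons_of_mem _ hm, hx⟩
      · rintro (h | ⟨hm, hne, hin⟩)
        · exact Or.inl h
        · rcases List.mem_cons.mp hm with h | h
          · exact absurd h hne
          · exact Or.inr ⟨h, hne, hin⟩
    · by_cases h2 : PySem.Str.isIn k token = true
      · rw [if_pos (by rw [Bool.and_eq_true]; exact ⟨bne_iff_ne.mpr h1, h2⟩)]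
        simp only [PySem.Set.mem_add]
        constructor
        · rintro ((h | h) | ⟨hm, hx⟩)
          · exact Or.inl h
          · subst h; exact Or.inr ⟨List.mem_cons_self, h1, h2⟩
          · exact Or.inr ⟨List.mem_cons_of_mem _ hm, hx⟩
        · rintro (h | ⟨hm, hx⟩)
          · exact Or.inl (Or.inl h)
          · rcases List.mem_cons.mp hm with h | h
            · exact Or.inl (Or.inr h)
            · exact Or.inr ⟨h, hx⟩
      · rw [if_neg (by rw [Bool.and_eq_true]; exact fun h => h2 h.2)]
        constructor
        · rintro (h | ⟨hm, hx⟩)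
          · exact Or.inl h
          · exact Or.inr ⟨List.mem_cons_of_mem _ hm, hx⟩
        · rintro (h | ⟨hm, hne, hin⟩)
          · exact Or.inl h
          · rcases List.mem_cons.mp hm with h | h
            · exact absurd (h ▸ hin) h2
            · exact Or.inr ⟨h, hne, hin⟩

theorem fmAInner_eq_filter (ks : List String) (s₀ : List String) (found : List String)
    (token : String) (h : ∀ x ∈ s₀, x ∈ found) :
    fmAInner found token ks = fmAInner found token (fmFilterP s₀ ks) := by
  induction ks generalizing found with
  | nil => rfl
  | cons k ks ih =>
    by_cases hp : (k != "" && !(PySem.Set.contains s₀ k)) = true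
    · simp only [fmFilterP, List.filter_cons]
      rw [if_pos hp, fmAInner_cons, fmAInner_cons]
      by_cases hc : (k != "" && PySem.Str.isIn k token) = true
      · rw [if_pos hc]
        exact ih (PySem.Set.add found k) (fun x hx => (PySem.Set.mem_add _ _ _).mpr (Or.inl (h x hx)))
      · rw [if_neg hc]
        exact ih found h
    · simp only [fmFilterP, List.filter_cons]
      rw [if_neg hp, fmAInner_cons]
      by_cases hne : (k != "") = true
      · have hcont : PySem.Set.contains s₀ k = true := by
          cases hcv : PySem.Set.contains s₀ k
          · exact absurd (by rw [hne, hcv]; rfl) hp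
          · rfl
        have hmem : k ∈ found := h k ((PySem.Set.contains_iff s₀ k).mp hcont)
        by_cases hc : (k != "" && PySem.Str.isIn k token) = true
        · rw [if_pos hc, PySem.Set.add_of_mem hmem]
          exact ih found h
        · rw [if_neg hc]
          exact ih found h
      · have hne' : (k != "") = false := by
          revert hne; cases (k != "") <;> simp
        rw [if_neg (by rw [hne', Bool.false_and]; simp)]
        exact ih found h

theorem fmAltStep_aux (p : List String) (found acc : List String) (token : String)
    (hp : ∀ k ∈ p, (k != "") = true) :
    p.foldl
      (fun (st : List String × List String) k =>
        if PySem.Str.isIn k token then (PySem.Set.add st.1 k, st.2)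
        else (st.1, st.2 ++ [k]))
      (found, acc)
    = (fmAInner found token p, acc ++ p.filter (fun k => !(PySem.Str.isIn k token))) := by
  induction p generalizing found acc with
  | nil => simp [fmAInner]
  | cons k ks ih =>
    have hk : (k != "") = true := hp k List.mem_cons_self
    rw [List.foldl_cons, fmAInner_cons]
    by_cases hc : PySem.Str.isIn k token = true
    · rw [if_pos hc, if_pos (by rw [hk, hc]; rfl),
        List.filter_cons_of_neg (by rw [hc]; decide),
        ih _ _ (fun x hx => hp x (List.mem_cons_of_mem _ hx))]
    · have hc' : PySem.Str.isIn k token = false := by simpa using hc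
      rw [if_neg hc, if_neg (by rw [hk, hc']; decide),
        List.filter_cons_of_pos (by rw [hc']; rfl),
        ih _ _ (fun x hx => hp x (List.mem_cons_of_mem _ hx))]
      simp

theorem fmFilterP_mem_ne (s ks : List String) (k : String) (h : k ∈ fmFilterP s ks) :
    (k != "") = true := by
  simp only [fmFilterP, List.mem_filter, Bool.and_eq_true] at h
  exact h.2.1

theorem fmPending_inv (keywords found : List String) (token : String) :
    (fmFilterP found keywords).filter (fun k => !(PySem.Str.isIn k token))
      = fmFilterP (fmAInner found token keywords) keywords := by
  rw [fmFilterP, List.filter_filter, fmFilterP]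
  apply List.filter_congr
  intro k hk
  by_cases h1 : k = ""
  · subst h1; simp
  · by_cases h2 : PySem.Str.isIn k token = true
    · have hc : k ∈ fmAInner found token keywords :=
        (mem_fmAInner keywords found token k).mpr (Or.inr ⟨hk, h1, h2⟩)
      have : PySem.Set.contains (fmAInner found token keywords) k = true :=
        (PySem.Set.contains_iff _ _).mpr hc
      rw [h2, this]
      simp
    · have h2f : PySem.Str.isIn k token = false := by
        revert h2; cases PySem.Str.isIn k token <;> simp
      have hiff : k ∈ fmAInner found token keywords ↔ k ∈ found := by
        rw [mem_fmAInner]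
        constructor
        · rintro (h | ⟨_, _, hin⟩)
          · exact h
          · rw [h2f] at hin; cases hin
        · exact fun h => Or.inl h
      by_cases h3 : k ∈ found
      · have c1 : PySem.Set.contains found k = true := (PySem.Set.contains_iff _ _).mpr h3
        have c2 : PySem.Set.contains (fmAInner found token keywords) k = true :=
          (PySem.Set.contains_iff _ _).mpr (hiff.mpr h3)
        rw [h2f, c1, c2]
        simp
      · have c1 : PySem.Set.contains found k = false := by
          by_contra hx
          exact h3 ((PySem.Set.contains_iff _ _).mp (by simpa using hx))
        have c2 : PySem.Set.contains (fmAInner found token keywords) k = false := by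
          by_contra hx
          exact h3 (hiff.mp ((PySem.Set.contains_iff _ _).mp (by simpa using hx)))
        rw [h2f, c1, c2]
        simp

theorem fmAltLoop_nil_pending (found : List String) (ts : List String) :
    fmAltLoop found [] ts = found := by
  cases ts with
  | nil => rfl
  | cons t ts => simp [fmAltLoop]

theorem fm_main (keywords : List String) (tokens : List String) (found : List String) :
    tokens.foldl (fun found token => fmAInner found token keywords) found
      = fmAltLoop found (fmFilterP found keywords) tokens := by
  induction tokens generalizing found with
  | nil => rfl
  | cons t rest ih =>
    rw [List.foldl_cons]
    show _ = fmAltLoop found (fmFilterP found keywords) (t :: rest)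
    rw [fmAltLoop]
    by_cases hp : (fmFilterP found keywords).isEmpty = true
    · rw [if_pos hp]
      have hnil : fmFilterP found keywords = [] := List.isEmpty_iff.mp hp
      have hid : fmAInner found t keywords = found := by
        rw [fmAInner_eq_filter keywords found found t (fun x hx => hx), hnil]
        rfl
      rw [hid, ih found, hnil, fmAltLoop_nil_pending]
    · rw [if_neg hp]
      have hstep :
          fmAltStep (found, fmFilterP found keywords) t
            = (fmAInner found t (fmFilterP found keywords),
               (fmFilterP found keywords).filter (fun k => !(PySem.Str.isIn k t))) := by
        simpa [fmAltStep] using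
          fmAltStep_aux (fmFilterP found keywords) found [] t
            (fun k hk => fmFilterP_mem_ne found keywords k hk)
      rw [hstep]
      have hA : fmAInner found t (fmFilterP found keywords) = fmAInner found t keywords :=
        (fmAInner_eq_filter keywords found found t (fun x hx => hx)).symm
      rw [hA, fmPending_inv keywords found t]
      exact ih (fmAInner found t keywords)

-- ===== VERDICT (by name: the statement is the Claim_ definition above) =====
theorem find_mentions_py_spec : Claim_equal_find_mentions_py := by
  intro tokens keywords _
  unfold Spec_find_mentions_py find_mentions_py find_mentions_py_alt
  by_cases hk : keywords.isEmpty = true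
  · rw [if_pos hk, List.isEmpty_iff.mp hk]
    simp only [List.filter_nil]
    rw [fmAltLoop_nil_pending]
  · rw [if_neg hk]
    rw [show (PySem.Set.empty : List String) = [] from rfl, fm_main keywords tokens []]
    congr 1
    rw [fmFilterP]
    apply List.filter_congr
    intro k _
    simp [PySem.Set.contains]
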